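-- pv_equiv track=rewrite | github.com/DailyDisco/linkedin-recommendation-writer | backend/app/services/readme_generation_service.py | _parse_readme_sections
-- ===== SOURCE A (Python) =====
-- from typing import Any, Dict, List, Optional
--
-- def _parse_readme_sections(content: str) -> Dict[str, str]:
--     """Parse README content into sections."""
--     sections = {}
--     lines = content.split("\n")
--     current_section: Optional[str] = None
--     current_content: List[str] = []
--
--     for line in lines:
--         if line.startswith("#"):
--             # Save previous section
--             if current_section and current_content:
--                 sections[current_section] = "\n".join(current_content).strip()
--
--             # Start new section
--             current_section = line.lstrip("#").strip()
--             current_content = []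
--         elif current_section:
--             current_content.append(line)
--
--     # Save final section
--     if current_section and current_content:
--         sections[current_section] = "\n".join(current_content).strip()
--
--     return sections
-- ===== SOURCE B (Python) =====
-- def _parse_readme_sections(content: str) -> dict:
--     """Parse README content into sections (two-pass: find headers, then slice bodies)."""
--     lines = content.split("\n")
--     headers = [(i, line.lstrip("#").strip()) for i, line in enumerate(lines) if line.startswith("#")]
--     bounds = [j for j, _ in headers[1:]] + [len(lines)]
--     sections = {}
--     for (i, name), next_i in zip(headers, bounds):
--         body = lines[i + 1:next_i]
--         if name and body:
--             sections[name] = "\n".join(body).strip()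
--     return sections
-- ===== Notes on version B (the rewrite author's own statement) =====
-- stated objective: alternative
-- what changed: B replaces A's single interleaved loop (carrying the current section name and an accumulating body list) with two passes: it first collects all header positions with cleaned names, then slices each body out of the line list between consecutive header indices; e.g. on "# Intro\nhello\n## Usage\nrun it" both build the same two sections.
import Mathlib
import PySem

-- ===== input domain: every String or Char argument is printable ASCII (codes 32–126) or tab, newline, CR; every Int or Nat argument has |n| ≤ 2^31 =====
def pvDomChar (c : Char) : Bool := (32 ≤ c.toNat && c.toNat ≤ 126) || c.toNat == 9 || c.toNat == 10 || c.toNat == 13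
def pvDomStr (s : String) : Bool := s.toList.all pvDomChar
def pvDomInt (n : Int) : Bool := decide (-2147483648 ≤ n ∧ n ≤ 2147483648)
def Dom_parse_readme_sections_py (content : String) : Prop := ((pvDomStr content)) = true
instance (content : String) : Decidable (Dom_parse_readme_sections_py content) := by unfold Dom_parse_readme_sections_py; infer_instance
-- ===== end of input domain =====

-- B re-decomposes A's single interleaved accumulation loop into two passes (collect header
-- positions, then slice each body between consecutive headers); objective: alternative.

-- helpers shared by both ports (both Pythons contain these exact sub-expressions):
-- content.split("\n"): sep is the nonempty literal "\n", so Str.split? is always `some`; getD is never hit.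
def pvLines (content : String) : List String := (PySem.Str.split? content "\n").getD []
-- line.lstrip("#").strip(): lstrip with the single strip-char '#' is dropWhile (· == '#') — exact.
def pvClean (line : String) : String :=
  PySem.Str.strip (String.ofList (line.toList.dropWhile (· == '#')))

-- ===== PORT A =====
-- the duplicated save snippet `if current_section and current_content: sections[…] = "\n".join(…).strip()`
def pvSave (d : PySem.Dict String String) (cur : Option String) (acc : List String) :
    PySem.Dict String String :=
  match cur with
  | some s => if s ≠ "" ∧ acc ≠ [] then d.insert s (PySem.Str.strip (PySem.Str.join "\n" acc)) else d
  | none => d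

-- one iteration of A's for-loop over (sections, current_section, current_content)
def pvAStep (st : PySem.Dict String String × Option String × List String) (line : String) :
    PySem.Dict String String × Option String × List String :=
  if PySem.Str.startswith line "#" then
    (pvSave st.1 st.2.1 st.2.2, some (pvClean line), [])
  else
    match st.2.1 with
    | some s => if s ≠ "" then (st.1, some s, st.2.2 ++ [line]) else st
    | none => st

def parse_readme_sections_py (content : String) : List (String × String) :=
  let st := (pvLines content).foldl pvAStep (PySem.Dict.empty, none, [])
  (pvSave st.1 st.2.1 st.2.2).items

-- ===== PORT B =====
-- enumerate(lines) starting at index k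
def pvEnum (k : Nat) : List String → List (Nat × String)
  | [] => []
  | l :: ls => (k, l) :: pvEnum (k + 1) ls

-- headers = [(i, line.lstrip("#").strip()) for i, line in enumerate(lines) if line.startswith("#")]
def pvHeaders (k : Nat) (ls : List String) : List (Nat × String) :=
  (pvEnum k ls).filterMap
    (fun p => if PySem.Str.startswith p.2 "#" then some (p.1, pvClean p.2) else none)

-- for (i, name), next_i in zip(headers, bounds): next_i is the next header's index (peeked from
-- the rest of the list) or len(lines); body = lines[i+1:next_i]
def pvBLoop (lines : List String) : List (Nat × String) → PySem.Dict String String →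
    PySem.Dict String String
  | [], d => d
  | (i, name) :: rest, d =>
    let nexti : Int := match rest with | [] => (lines.length : Int) | (j, _) :: _ => (j : Int)
    let body := PySem.List.slice lines (some ((i : Int) + 1)) (some nexti)
    pvBLoop lines rest
      (if name ≠ "" ∧ body ≠ [] then d.insert name (PySem.Str.strip (PySem.Str.join "\n" body)) else d)

def parse_readme_sections_py_alt (content : String) : List (String × String) :=
  let lines := pvLines content
  (pvBLoop lines (pvHeaders 0 lines) PySem.Dict.empty).items

-- ===== PRECONDITION & SPEC =====
def Spec_parse_readme_sections_py (content : String) (out : List (String × String)) : Prop := out = parse_readme_sections_py_alt content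
instance (content : String) (out : List (String × String)) : Decidable (Spec_parse_readme_sections_py content out) := by unfold Spec_parse_readme_sections_py; infer_instance

-- ===== CLAIM (what is proved, stated in full; the proofs are below) =====
def Claim_equal_parse_readme_sections_py : Prop := ∀ (content : String), Dom_parse_readme_sections_py content → Spec_parse_readme_sections_py content (parse_readme_sections_py content)

-- ===== LEMMAS AND PROOFS =====

-- reference recursion: process lines section by section (both ports are proved equal to it)
def pvNotHash (l : String) : Bool := !(PySem.Str.startswith l "#")

def pvRef : List String → PySem.Dict String String → PySem.Dict String String
  | [], d => d
  | l :: ls, d =>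
    if PySem.Str.startswith l "#" then
      let body := ls.takeWhile pvNotHash
      pvRef (ls.dropWhile pvNotHash)
        (if pvClean l ≠ "" ∧ body ≠ [] then
          d.insert (pvClean l) (PySem.Str.strip (PySem.Str.join "\n" body)) else d)
    else pvRef ls d
termination_by ls => ls.length
decreasing_by
  · have := List.length_dropWhile_le pvNotHash ls; simp; omega
  · simp

theorem pvRef_cons_hash (l : String) (ls : List String) (d : PySem.Dict String String)
    (hb : PySem.Str.startswith l "#" = true) :
    pvRef (l :: ls) d =
      pvRef (ls.dropWhile pvNotHash)
        (if pvClean l ≠ "" ∧ ls.takeWhile pvNotHash ≠ [] then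
          d.insert (pvClean l) (PySem.Str.strip (PySem.Str.join "\n" (ls.takeWhile pvNotHash)))
        else d) := by
  rw [pvRef, if_pos hb]

theorem pvRef_cons_nohash (l : String) (ls : List String) (d : PySem.Dict String String)
    (hb : PySem.Str.startswith l "#" = false) :
    pvRef (l :: ls) d = pvRef ls d := by
  rw [pvRef, if_neg (by simp only [hb]; exact Bool.false_ne_true)]

theorem pvA2 (ls : List String) (d : PySem.Dict String String) (name : String)
    (acc : List String) :
    (fun st => pvSave st.1 st.2.1 st.2.2) (ls.foldl pvAStep (d, some name, acc)) =
      pvRef (ls.dropWhile pvNotHash)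
        (if name ≠ "" ∧ acc ++ ls.takeWhile pvNotHash ≠ [] then
          d.insert name (PySem.Str.strip (PySem.Str.join "\n" (acc ++ ls.takeWhile pvNotHash)))
        else d) := by
  induction ls generalizing d name acc with
  | nil =>
    simp only [List.foldl_nil, List.dropWhile_nil, List.takeWhile_nil, List.append_nil, pvRef,
      pvSave]
  | cons l ls ih =>
    cases hb : PySem.Str.startswith l "#" with
    | true =>
      have hnh : pvNotHash l = false := by unfold pvNotHash; rw [hb]; rfl
      rw [List.foldl_cons,
        show pvAStep (d, some name, acc) l = (pvSave d (some name) acc, some (pvClean l), [])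
          from by unfold pvAStep; rw [if_pos hb],
        ih, List.dropWhile_cons_of_neg (by rw [hnh]; exact Bool.false_ne_true),
        List.takeWhile_cons_of_neg (by rw [hnh]; exact Bool.false_ne_true),
        pvRef_cons_hash l ls _ hb]
      simp only [pvSave, List.nil_append, List.append_nil]
    | false =>
      have hnh : pvNotHash l = true := by unfold pvNotHash; rw [hb]; rfl
      rw [List.dropWhile_cons_of_pos hnh, List.takeWhile_cons_of_pos hnh, List.foldl_cons]
      by_cases hn : name = ""
      · rw [show pvAStep (d, some name, acc) l = (d, some name, acc) from by
          unfold pvAStep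
          rw [if_neg (by rw [hb]; exact Bool.false_ne_true)]
          simp only [hn, ne_eq, not_true_eq_false, if_false], ih]
        rw [if_neg (by simp only [hn]; tauto), if_neg (by simp only [hn]; tauto)]
      · rw [show pvAStep (d, some name, acc) l = (d, some name, acc ++ [l]) from by
          unfold pvAStep
          rw [if_neg (by rw [hb]; exact Bool.false_ne_true)]
          simp only [ne_eq, hn, not_false_eq_true, if_true], ih]
        rw [if_pos ⟨hn, by simp⟩, if_pos ⟨hn, by simp⟩]
        simp only [List.append_assoc, List.singleton_append]

theorem pvA1 (ls : List String) (d : PySem.Dict String String) :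
    (fun st => pvSave st.1 st.2.1 st.2.2) (ls.foldl pvAStep (d, none, [])) = pvRef ls d := by
  induction ls generalizing d with
  | nil => simp only [List.foldl_nil, pvRef, pvSave]
  | cons l ls ih =>
    cases hb : PySem.Str.startswith l "#" with
    | true =>
      rw [List.foldl_cons,
        show pvAStep (d, none, []) l = (d, some (pvClean l), []) from by
          unfold pvAStep; rw [if_pos hb]; rfl,
        pvA2, pvRef_cons_hash l ls d hb]
      simp only [List.nil_append]
    | false =>
      rw [List.foldl_cons,
        show pvAStep (d, none, []) l = (d, none, []) from by
          unfold pvAStep; rw [if_neg (by rw [hb]; exact Bool.false_ne_true)],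
        ih, pvRef_cons_nohash l ls d hb]

theorem pvBLoop_cons (lines : List String) (i : Nat) (name : String)
    (rest : List (Nat × String)) (d : PySem.Dict String String) :
    pvBLoop lines ((i, name) :: rest) d =
      pvBLoop lines rest
        (if name ≠ "" ∧
            PySem.List.slice lines (some ((i : Int) + 1))
              (some (match rest with
                | [] => (lines.length : Int) | (j, _) :: _ => (j : Int))) ≠ [] then
          d.insert name
            (PySem.Str.strip (PySem.Str.join "\n"
              (PySem.List.slice lines (some ((i : Int) + 1))
                (some (match rest with
                  | [] => (lines.length : Int) | (j, _) :: _ => (j : Int))))))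
        else d) := rfl

theorem pvHeaders_cons_hash (k : Nat) (l : String) (ls : List String)
    (hb : PySem.Str.startswith l "#" = true) :
    pvHeaders k (l :: ls) = (k, pvClean l) :: pvHeaders (k + 1) ls := by
  unfold pvHeaders
  rw [show pvEnum k (l :: ls) = (k, l) :: pvEnum (k + 1) ls from rfl, List.filterMap_cons]
  simp only [if_pos hb]

theorem pvHeaders_cons_nohash (k : Nat) (l : String) (ls : List String)
    (hb : PySem.Str.startswith l "#" = false) :
    pvHeaders k (l :: ls) = pvHeaders (k + 1) ls := by
  unfold pvHeaders
  rw [show pvEnum k (l :: ls) = (k, l) :: pvEnum (k + 1) ls from rfl, List.filterMap_cons]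
  simp only [hb, Bool.false_eq_true, if_false]

theorem pvHeaders_dropWhile (ls : List String) (k : Nat) :
    pvHeaders k ls = pvHeaders (k + (ls.takeWhile pvNotHash).length) (ls.dropWhile pvNotHash) := by
  induction ls generalizing k with
  | nil => simp
  | cons l ls ih =>
    cases hb : PySem.Str.startswith l "#" with
    | true =>
      have hnh : pvNotHash l = false := by unfold pvNotHash; rw [hb]; rfl
      rw [List.dropWhile_cons_of_neg (by rw [hnh]; exact Bool.false_ne_true),
        List.takeWhile_cons_of_neg (by rw [hnh]; exact Bool.false_ne_true)]
      simp
    | false =>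
      have hnh : pvNotHash l = true := by unfold pvNotHash; rw [hb]; rfl
      rw [List.dropWhile_cons_of_pos hnh, List.takeWhile_cons_of_pos hnh,
        pvHeaders_cons_nohash k l ls hb, ih (k + 1)]
      congr 1
      simp only [List.length_cons]
      omega

theorem pvTake_takeWhile {α : Type} (p : α → Bool) (ls : List α) :
    ls.take (ls.takeWhile p).length = ls.takeWhile p := by
  induction ls with
  | nil => simp
  | cons l ls ih =>
    by_cases h : p l
    · rw [List.takeWhile_cons_of_pos h]; simp [ih]
    · rw [List.takeWhile_cons_of_neg (by simp [h])]; simp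

theorem pvDrop_takeWhile {α : Type} (p : α → Bool) (ls : List α) :
    ls.drop (ls.takeWhile p).length = ls.dropWhile p := by
  induction ls with
  | nil => simp
  | cons l ls ih =>
    by_cases h : p l
    · rw [List.takeWhile_cons_of_pos h, List.dropWhile_cons_of_pos h]; simp [ih]
    · rw [List.takeWhile_cons_of_neg (by simp [h]), List.dropWhile_cons_of_neg (by simp [h])]
      simp

theorem pvB1 (n : Nat) (ls : List String) (hn : ls.length ≤ n) (k : Nat) (lines : List String)
    (hk : lines.drop k = ls) (d : PySem.Dict String String) :
    pvBLoop lines (pvHeaders k ls) d = pvRef ls d := by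
  induction n generalizing ls k d with
  | zero =>
    have : ls = [] := by cases ls <;> simp_all
    subst this; simp [pvHeaders, pvEnum, pvBLoop, pvRef]
  | succ n ih =>
    match ls, hn with
    | [], _ => simp [pvHeaders, pvEnum, pvBLoop, pvRef]
    | l :: ls, hn =>
      cases hb : PySem.Str.startswith l "#" with
      | true =>
        have hnh : pvNotHash l = false := by unfold pvNotHash; rw [hb]; rfl
        have hdrop1 : lines.drop (k + 1) = ls := by
          rw [show k + 1 = 1 + k from by omega, Nat.add_comm 1 k, ← List.drop_drop, hk]
          simp
        have hklen : k + 1 + ls.length = lines.length := by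
          have h1 := congrArg List.length hk
          simp only [List.length_drop, List.length_cons] at h1
          have hkle : k ≤ lines.length := by
            by_contra h
            rw [List.drop_eq_nil_of_le (by omega)] at hk
            simp at hk
          omega
        set m := (ls.takeWhile pvNotHash).length with hm
        have hmle : m ≤ ls.length := by
          exact (List.takeWhile_prefix (l := ls) (p := pvNotHash)).length_le
        have hheads : pvHeaders k (l :: ls) =
            (k, pvClean l) :: pvHeaders (k + 1 + m) (ls.dropWhile pvNotHash) := by
          rw [pvHeaders_cons_hash k l ls hb, pvHeaders_dropWhile ls (k + 1)]
        -- the next bound: head index of the remaining headers, or len(lines)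
        have hnexti : (match pvHeaders (k + 1 + m) (ls.dropWhile pvNotHash) with
            | [] => (lines.length : Int) | (j, _) :: _ => (j : Int)) = ((k + 1 + m : Nat) : Int) := by
          rcases hrest : ls.dropWhile pvNotHash with _ | ⟨r, rs⟩
          · have hml : m = ls.length := by
              have h2 := congrArg List.length
                (List.takeWhile_append_dropWhile (p := pvNotHash) (l := ls))
              rw [hrest] at h2
              simp only [List.append_nil] at h2
              omega
            simp only [pvHeaders, pvEnum, List.filterMap_nil]
            rw [show lines.length = k + 1 + m from by omega]
          · have hr : PySem.Str.startswith r "#" = true := by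
              have h3 := List.head_dropWhile_not (p := pvNotHash) (l := ls)
                (by rw [hrest]; exact List.cons_ne_nil r rs)
              simp only [hrest, List.head_cons] at h3
              simpa [pvNotHash] using h3
            rw [pvHeaders_cons_hash _ r rs hr]
        have hslice : PySem.List.slice lines (some ((k : Int) + 1)) (some ((k + 1 + m : Nat) : Int)) =
            ls.takeWhile pvNotHash := by
          rw [show ((k : Int) + 1) = ((k + 1 : Nat) : Int) from by push_cast; ring,
            PySem.List.slice_natCast, show k + 1 + m - (k + 1) = m from by omega, hdrop1, hm,
            pvTake_takeWhile]
        rw [hheads, pvBLoop_cons, hnexti, hslice]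
        rw [ih (ls.dropWhile pvNotHash)
          (by have := List.length_dropWhile_le pvNotHash ls
              simp only [List.length_cons] at hn; omega)
          (k + 1 + m)
          (by rw [show k + 1 + m = m + (k + 1) from by omega, Nat.add_comm m (k + 1),
                ← List.drop_drop, hdrop1]
              exact pvDrop_takeWhile pvNotHash ls)]
        rw [pvRef_cons_hash l ls d hb]
      | false =>
        rw [pvHeaders_cons_nohash k l ls hb,
          ih ls (by simp only [List.length_cons] at hn; omega) (k + 1)
            (by rw [show k + 1 = 1 + k from by omega, Nat.add_comm 1 k, ← List.drop_drop, hk]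
                simp) d,
          pvRef_cons_nohash l ls d hb]

-- ===== VERDICT (by name: the statement is the Claim_ definition above) =====
theorem parse_readme_sections_py_spec : Claim_equal_parse_readme_sections_py := by
  intro content _
  unfold Spec_parse_readme_sections_py parse_readme_sections_py parse_readme_sections_py_alt
  have hA := pvA1 (pvLines content) PySem.Dict.empty
  have hB := pvB1 (pvLines content).length (pvLines content) le_rfl 0 (pvLines content)
    (by simp) PySem.Dict.empty
  simp only at hA
  exact congrArg PySem.Dict.items (hA.trans hB.symm)
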